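-- pv_equiv track=rewrite | github.com/javier008l/TallerFinalAnalisis-SeGANA- | src/controllers/strategies/geometric2.py | vecinos_hamming_1
-- ===== SOURCE A (Python) =====
-- from itertools import permutations
--
-- def vecinos_hamming_1(origen: str, destino: str) -> list[list[str]]:
--     """
--     Genera todos los caminos binarios de Hamming 1 desde `origen` hasta `destino`.
--     """
--     n = len(origen)
--     indices_diferentes = [i for i in range(n) if origen[i] != destino[i]]
--
--     caminos = []
--     for orden in permutations(indices_diferentes):
--         actual = list(origen)
--         camino = ["".join(actual)]
--
--         for idx in orden:
--             actual[idx] = destino[idx]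
--             camino.append("".join(actual))
--
--         caminos.append(camino)
--
--     return caminos
-- ===== SOURCE B (Python) =====
-- def vecinos_hamming_1(origen: str, destino: str) -> list[list[str]]:
--     """
--     Genera todos los caminos binarios de Hamming 1 desde `origen` hasta `destino`,
--     por backtracking recursivo (comparte prefijos en vez de rejugar cada permutacion).
--     """
--     indices = [i for i in range(len(origen)) if origen[i] != destino[i]]
--
--     def back(remaining, actual, camino):
--         if not remaining:
--             return [camino]
--         paths = []
--         for k in range(len(remaining)):
--             idx = remaining[k]
--             nuevo = actual.copy()
--             nuevo[idx] = destino[idx]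
--             paths.extend(back(remaining[:k] + remaining[k + 1:],
--                               nuevo, camino + ["".join(nuevo)]))
--         return paths
--
--     return back(indices, list(origen), ["".join(origen)])
-- ===== Notes on version B (the rewrite author's own statement) =====
-- stated objective: alternative
-- what changed: Replaces itertools.permutations plus a per-permutation replay loop by a recursive backtracking search that extends each path one flip at a time, sharing common prefixes instead of rebuilding every path from the origin.
import Mathlib
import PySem

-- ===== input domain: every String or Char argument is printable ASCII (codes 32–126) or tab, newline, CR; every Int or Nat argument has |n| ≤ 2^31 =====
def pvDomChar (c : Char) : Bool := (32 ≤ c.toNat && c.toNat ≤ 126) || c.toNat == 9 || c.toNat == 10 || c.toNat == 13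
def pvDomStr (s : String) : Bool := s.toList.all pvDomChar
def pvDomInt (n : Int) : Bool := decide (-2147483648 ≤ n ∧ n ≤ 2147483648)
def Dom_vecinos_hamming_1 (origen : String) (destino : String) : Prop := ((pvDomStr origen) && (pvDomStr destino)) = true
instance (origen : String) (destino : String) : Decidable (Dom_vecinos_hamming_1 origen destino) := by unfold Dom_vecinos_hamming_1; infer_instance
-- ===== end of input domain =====

-- B replaces itertools.permutations + a per-permutation replay fold by a recursive
-- backtracking search that extends each path one flip at a time (alternative decomposition).

-- ===== PORT A =====
def vecinos_hamming_1 (origen : String) (destino : String) : List (List String) :=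
  let o := origen.toList
  let d := destino.toList
  let n := o.length
  let indices_diferentes := (List.range n).filter (fun i => o.getD i ' ' != d.getD i ' ')
  (PySem.List.permutations indices_diferentes indices_diferentes.length).map (fun orden =>
    (orden.foldl (fun (st : List Char × List String) idx =>
        let actual := st.1.set idx (d.getD idx ' ')
        (actual, st.2 ++ [String.ofList actual])) (o, [String.ofList o])).2)

-- ===== PORT B =====
-- Source B's recursive helper `back`; the k-loop over `range(len(remaining))` with slices
-- `remaining[:k] + remaining[k+1:]` is the flatMap over the (attached, for termination) range.
def bBack (d : List Char) (remaining : List Nat) (actual : List Char) (camino : List String) :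
    List (List String) :=
  match remaining with
  | [] => [camino]
  | x :: xs =>
    (List.range (x :: xs).length).attach.flatMap (fun k =>
      let idx := (x :: xs).getD k.1 0
      let nuevo := actual.set idx (d.getD idx ' ')
      bBack d ((x :: xs).take k.1 ++ (x :: xs).drop (k.1 + 1)) nuevo (camino ++ [String.ofList nuevo]))
  termination_by remaining.length
  decreasing_by
    have hk : k.1 < (x :: xs).length := List.mem_range.mp k.2
    have h1 : ((x :: xs).take k.1 ++ (x :: xs).drop (k.1 + 1)).length = (x :: xs).length - 1 := by
      rw [← List.eraseIdx_eq_take_drop_succ, List.length_eraseIdx_of_lt hk]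
    simp at h1 ⊢
    omega

def vecinos_hamming_1_alt (origen : String) (destino : String) : List (List String) :=
  let o := origen.toList
  let d := destino.toList
  let indices := (List.range o.length).filter (fun i => o.getD i ' ' != d.getD i ' ')
  bBack d indices o [String.ofList o]

-- ===== PRECONDITION & SPEC =====
-- Pre_ excludes exactly the inputs where `destino` is shorter than `origen`: there the Python A
-- (and B alike) raise IndexError on destino[i].
def Pre_vecinos_hamming_1 (origen : String) (destino : String) : Prop :=
  origen.toList.length ≤ destino.toList.length
instance (origen : String) (destino : String) : Decidable (Pre_vecinos_hamming_1 origen destino) := by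
  unfold Pre_vecinos_hamming_1; infer_instance

def pvWitness_vecinos_hamming_1 : String × String := ("ab", "bb")

def Spec_vecinos_hamming_1 (origen : String) (destino : String) (out : List (List String)) : Prop := out = vecinos_hamming_1_alt origen destino
instance (origen : String) (destino : String) (out : List (List String)) : Decidable (Spec_vecinos_hamming_1 origen destino out) := by unfold Spec_vecinos_hamming_1; infer_instance

-- ===== CLAIM (what is proved, stated in full; the proofs are below) =====
def Claim_equal_vecinos_hamming_1 : Prop := ∀ (origen : String) (destino : String), Dom_vecinos_hamming_1 origen destino → Pre_vecinos_hamming_1 origen destino → Spec_vecinos_hamming_1 origen destino (vecinos_hamming_1 origen destino)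

-- ===== LEMMAS AND PROOFS =====

lemma flatMap_attach {α β : Type} (l : List α) (f : α → List β) :
    l.attach.flatMap (fun x => f x.1) = l.flatMap f := by
  simp [List.flatMap_eq_foldl]

lemma bBack_nil (d : List Char) (a : List Char) (c : List String) : bBack d [] a c = [c] := by
  rw [bBack.eq_def]

lemma bBack_cons (d : List Char) (r : Nat) (rs : List Nat) (actual : List Char) (c : List String) :
    bBack d (r :: rs) actual c =
      (List.range (r :: rs).length).flatMap (fun k =>
        bBack d ((r :: rs).take k ++ (r :: rs).drop (k + 1))
          (actual.set ((r :: rs).getD k 0) (d.getD ((r :: rs).getD k 0) ' '))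
          (c ++ [String.ofList (actual.set ((r :: rs).getD k 0) (d.getD ((r :: rs).getD k 0) ' '))])) := by
  rw [bBack.eq_def]
  exact flatMap_attach (List.range (r :: rs).length)
    (fun k => bBack d ((r :: rs).take k ++ (r :: rs).drop (k + 1))
      (actual.set ((r :: rs).getD k 0) (d.getD ((r :: rs).getD k 0) ' '))
      (c ++ [String.ofList (actual.set ((r :: rs).getD k 0) (d.getD ((r :: rs).getD k 0) ' '))]))

-- Backtracking equals: map the A-side replay fold over itertools-ordered permutations.
lemma bBack_eq (d : List Char) :
    ∀ (remaining : List Nat) (actual : List Char) (camino : List String),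
    bBack d remaining actual camino =
      (PySem.List.permutations remaining remaining.length).map (fun orden =>
        (orden.foldl (fun (st : List Char × List String) idx =>
            let a := st.1.set idx (d.getD idx ' ')
            (a, st.2 ++ [String.ofList a])) (actual, camino)).2) := by
  intro remaining
  induction hn : remaining.length using Nat.strong_induction_on generalizing remaining with
  | _ n ih =>
    intro actual camino
    match remaining, hn with
    | [], hn =>
      subst hn
      simp [bBack_nil]
    | (r :: rs), hn =>
      subst hn
      rw [bBack_cons]
      rw [show (r :: rs).length = rs.length + 1 from rfl]
      rw [PySem.List.permutations, List.map_flatMap]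
      apply List.flatMap_congr
      intro k hk
      have hklt : k < (r :: rs).length := List.mem_range.mp hk
      have hget : (r :: rs)[k]? = some ((r :: rs).getD k 0) := by
        rw [List.getD_eq_getElem _ _ hklt, List.getElem?_eq_getElem hklt]
      simp only [hget]
      rw [← List.eraseIdx_eq_take_drop_succ]
      have hlen : ((r :: rs).eraseIdx k).length = rs.length := by
        rw [List.length_eraseIdx_of_lt hklt]; rfl
      rw [ih rs.length (by simp) _ hlen, List.map_map]
      simp [List.foldl, Function.comp]

-- ===== VERDICT (by name: the statement is the Claim_ definition above) =====
theorem vecinos_hamming_1_spec : Claim_equal_vecinos_hamming_1 := by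
  intro origen destino _ _
  unfold Spec_vecinos_hamming_1 vecinos_hamming_1 vecinos_hamming_1_alt
  rw [bBack_eq]
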